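-- pv_equiv track=rewrite | github.com/pratyush-k-singh/Wordle-Solver | wordle_solver.py | get_restrictions_from_guesses
-- ===== SOURCE A (Python) =====
-- def get_restrictions_from_guesses(guesses):
--     excluded_letters = set()
--     exact_counts = {}
--     position_restrictions = {}
--     for word, feedback in guesses:
--         occurrences = {}
--         for index, char in enumerate(word):
--             if char not in occurrences:
--                 occurrences[char] = {}
--             occurrences[char][index] = feedback[index]
--         for char, feedbacks in occurrences.items():
--             feedback_types = set(feedbacks.values())
--             if 'b' in feedback_types:
--                 count = sum(1 for feedback in feedbacks.values() if feedback in {'g', 'y'})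
--                 exact_counts[char] = count
--                 excluded_positions = {i for i, feedback in feedbacks.items() if feedback in {'b', 'y'}}
--                 if char not in position_restrictions:
--                     position_restrictions[char] = set()
--                 position_restrictions[char].update(excluded_positions)
--             else:
--                 excluded_positions = {i for i, feedback in feedbacks.items() if feedback == 'y'}
--                 if char not in position_restrictions:
--                     position_restrictions[char] = set()
--                 position_restrictions[char].update(excluded_positions)
--     return excluded_letters, exact_counts, position_restrictions
-- ===== SOURCE B (Python) =====
-- def get_restrictions_from_guesses(guesses):
--     excluded_letters = set()
--     exact_counts = {}
--     position_restrictions = {}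
--     for word, feedback in guesses:
--         # single pass: per char (in first-appearance order) track
--         # [y positions, saw a 'b', count of 'g'/'y', positions with 'b' or 'y']
--         info = {}
--         for i, ch in enumerate(word):
--             fb = feedback[i]
--             rec = info.get(ch)
--             if rec is None:
--                 rec = [set(), False, 0, set()]
--                 info[ch] = rec
--             if fb == 'y':
--                 rec[0].add(i)
--             if fb == 'b':
--                 rec[1] = True
--             if fb == 'g' or fb == 'y':
--                 rec[2] += 1
--             if fb == 'b' or fb == 'y':
--                 rec[3].add(i)
--         for ch, (ypos, saw_b, count, bypos) in info.items():
--             bucket = position_restrictions.setdefault(ch, set())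
--             if saw_b:
--                 exact_counts[ch] = count
--                 bucket.update(bypos)
--             else:
--                 bucket.update(ypos)
--     return excluded_letters, exact_counts, position_restrictions
-- ===== Notes on version B (the rewrite author's own statement) =====
-- stated objective: alternative
-- what changed: A builds a per-word nested occurrences dict (char -> index -> feedback) and then re-scans each group three times (set of feedback types, a counted generator, a filtered comprehension); B makes one pass over enumerate(word) maintaining per-char running aggregates (y-positions, saw-'b' flag, g/y count, b/y-positions) and emits from them directly.
import Mathlib
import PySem

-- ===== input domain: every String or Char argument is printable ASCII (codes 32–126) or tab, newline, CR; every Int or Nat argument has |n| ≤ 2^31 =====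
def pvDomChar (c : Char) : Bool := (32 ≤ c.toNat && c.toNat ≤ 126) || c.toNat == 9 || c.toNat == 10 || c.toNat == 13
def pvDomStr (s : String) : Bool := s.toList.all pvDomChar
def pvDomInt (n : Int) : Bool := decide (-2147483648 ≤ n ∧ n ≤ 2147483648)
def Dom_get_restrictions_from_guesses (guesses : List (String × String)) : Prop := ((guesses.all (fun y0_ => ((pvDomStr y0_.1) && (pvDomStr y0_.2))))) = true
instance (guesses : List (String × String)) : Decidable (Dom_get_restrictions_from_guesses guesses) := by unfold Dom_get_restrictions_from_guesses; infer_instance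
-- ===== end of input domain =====

-- B replaces A's per-word nested occurrences dict (char -> index -> feedback) and its
-- second per-group scan by a SINGLE pass over enumerate(word) that maintains per-char
-- running aggregates (y-positions, saw-'b' flag, g/y count, b/y-positions); objective:
-- alternative decomposition, same asymptotic cost.

-- The per-guess accumulator: (exact_counts, position_restrictions)
abbrev pvSt := PySem.Dict String Int × PySem.Dict String (PySem.Set Int)

-- ===== PORT A =====
-- a Python character (iterating a str yields length-1 strings)
def pvStrA (c : Char) : String := String.ofList [c]

-- the inner loop: occurrences[char][index] = feedback[index]
def pvA_inner (fcs : List String) (occ : PySem.Dict String (PySem.Dict Int String))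
    (p : Int × String) : PySem.Dict String (PySem.Dict Int String) :=
  occ.insert p.2 ((occ.getD p.2 PySem.Dict.empty).insert p.1 (PySem.List.pyGetD fcs p.1 ""))

-- the "for char, feedbacks in occurrences.items()" body
def pvA_group (st : pvSt) (q : String × PySem.Dict Int String) : pvSt :=
  let ftypes : PySem.Set String := PySem.Set.ofList q.2.values
  if ftypes.contains "b" then
    let count : Int := (q.2.values.map (fun f => if f == "g" || f == "y" then (1:Int) else 0)).sum
    let excl : PySem.Set Int :=
      PySem.Set.ofList ((q.2.items.filter (fun r => r.2 == "b" || r.2 == "y")).map (·.1))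
    (st.1.insert q.1 count,
     st.2.insert q.1 (PySem.Set.update (st.2.getD q.1 PySem.Set.empty) excl))
  else
    let excl : PySem.Set Int :=
      PySem.Set.ofList ((q.2.items.filter (fun r => r.2 == "y")).map (·.1))
    (st.1,
     st.2.insert q.1 (PySem.Set.update (st.2.getD q.1 PySem.Set.empty) excl))

def pvA_word (st : pvSt) (g : String × String) : pvSt :=
  let wcs := g.1.toList.map pvStrA
  let fcs := g.2.toList.map pvStrA
  let occ := (PySem.List.enumerate wcs 0).foldl (pvA_inner fcs) PySem.Dict.empty
  occ.items.foldl pvA_group st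

def get_restrictions_from_guesses (guesses : List (String × String)) :
    List String × (List (String × Int)) × (List (String × List Int)) :=
  let r := guesses.foldl pvA_word (PySem.Dict.empty, PySem.Dict.empty)
  (([] : List String), r.1.items, r.2.items)

-- ===== PORT B =====
def pvStrB (c : Char) : String := String.ofList [c]

-- per-char running record: (y positions, saw 'b', count of 'g'/'y', positions with 'b' or 'y')
abbrev pvRec := PySem.Set Int × Bool × Int × PySem.Set Int

-- the single pass over enumerate(word)
def pvB_scan (fcs : List String) (d : PySem.Dict String pvRec) (p : Int × String) :
    PySem.Dict String pvRec :=
  let fb := PySem.List.pyGetD fcs p.1 ""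
  d.modify p.2 (PySem.Set.empty, false, 0, PySem.Set.empty) (fun r =>
    ((if fb == "y" then PySem.Set.add r.1 p.1 else r.1),
     (r.2.1 || fb == "b"),
     (r.2.2.1 + (if fb == "g" || fb == "y" then (1:Int) else 0)),
     (if fb == "b" || fb == "y" then PySem.Set.add r.2.2.2 p.1 else r.2.2.2)))

-- the "for ch, (ypos, saw_b, count, bypos) in info.items()" body
def pvB_emit (st : pvSt) (q : String × pvRec) : pvSt :=
  let bucket := st.2.getD q.1 PySem.Set.empty
  if q.2.2.1 then
    (st.1.insert q.1 q.2.2.2.1, st.2.insert q.1 (PySem.Set.update bucket q.2.2.2.2))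
  else
    (st.1, st.2.insert q.1 (PySem.Set.update bucket q.2.1))

def pvB_word (st : pvSt) (g : String × String) : pvSt :=
  let wcs := g.1.toList.map pvStrB
  let fcs := g.2.toList.map pvStrB
  let info := (PySem.List.enumerate wcs 0).foldl (pvB_scan fcs) PySem.Dict.empty
  info.items.foldl pvB_emit st

def get_restrictions_from_guesses_alt (guesses : List (String × String)) :
    List String × (List (String × Int)) × (List (String × List Int)) :=
  let r := guesses.foldl pvB_word (PySem.Dict.empty, PySem.Dict.empty)
  (([] : List String), r.1.items, r.2.items)

-- ===== PRECONDITION & SPEC =====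
-- Pre_ excludes exactly the guesses where feedback is shorter than word: there Python A
-- raises IndexError on feedback[index].
def Pre_get_restrictions_from_guesses (guesses : List (String × String)) : Prop :=
  (guesses.all (fun g => g.1.toList.length ≤ g.2.toList.length)) = true
instance (guesses : List (String × String)) : Decidable (Pre_get_restrictions_from_guesses guesses) := by
  unfold Pre_get_restrictions_from_guesses; infer_instance

def pvWitness_get_restrictions_from_guesses : (List (String × String)) := [("ab", "gb"), ("ba", "yby")]

def Spec_get_restrictions_from_guesses (guesses : List (String × String))
    (out : List String × (List (String × Int)) × (List (String × List Int))) : Prop :=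
  out = get_restrictions_from_guesses_alt guesses
instance (guesses : List (String × String)) (out : List String × (List (String × Int)) × (List (String × List Int))) : Decidable (Spec_get_restrictions_from_guesses guesses out) := by
  unfold Spec_get_restrictions_from_guesses; infer_instance

-- ===== CLAIM (what is proved, stated in full; the proofs are below) =====
def Claim_equal_get_restrictions_from_guesses : Prop := ∀ (guesses : List (String × String)), Dom_get_restrictions_from_guesses guesses → Pre_get_restrictions_from_guesses guesses → Spec_get_restrictions_from_guesses guesses (get_restrictions_from_guesses guesses)

-- ===== LEMMAS AND PROOFS =====

-- B's running record is exactly this function of A's per-char inner dict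
def phiA (fbs : PySem.Dict Int String) : pvRec :=
  (PySem.Set.ofList ((fbs.items.filter (fun r => r.2 == "y")).map (·.1)),
   fbs.values.contains "b",
   (fbs.values.map (fun f => if f == "g" || f == "y" then (1:Int) else 0)).sum,
   PySem.Set.ofList ((fbs.items.filter (fun r => r.2 == "b" || r.2 == "y")).map (·.1)))

-- lookup through an item-wise image of a dict
theorem pv_get?_map {ν ν' : Type} (φ : ν → ν') :
    ∀ (l : List (String × ν)) (k : String),
      (PySem.Dict.mk (l.map (fun p => (p.1, φ p.2)))).get? k = ((PySem.Dict.mk l).get? k).map φ := by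
  intro l
  induction l with
  | nil => intro k; simp [PySem.Dict.get?]
  | cons p t ih =>
    intro k
    simp only [List.map_cons, PySem.Dict.get?_mk_cons]
    rw [PySem.Dict.get?_mk_cons]
    split <;> simp [ih]

theorem pv_ofList_append_singleton {α : Type} [BEq α] (xs : List α) (x : α) :
    PySem.Set.ofList (xs ++ [x]) = PySem.Set.add (PySem.Set.ofList xs) x := by
  simp [PySem.Set.ofList, List.foldl_append]

-- inserting a FRESH index into the inner dict updates the aggregates the way B's scan does
theorem pv_phi_insert (inner : PySem.Dict Int String) (n : Int) (fb : String)
    (hfresh : inner.contains n = false) :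
    phiA (inner.insert n fb) =
      ((if fb == "y" then PySem.Set.add (phiA inner).1 n else (phiA inner).1),
       ((phiA inner).2.1 || fb == "b"),
       ((phiA inner).2.2.1 + (if fb == "g" || fb == "y" then (1:Int) else 0)),
       (if fb == "b" || fb == "y" then PySem.Set.add (phiA inner).2.2.2 n else (phiA inner).2.2.2)) := by
  unfold phiA
  rw [PySem.Dict.items_insert_of_not_contains inner fb hfresh]
  simp only [PySem.Dict.values, List.filter_append, List.map_append, Prod.mk.injEq]
  refine ⟨?_, ?_, ?_, ?_⟩
  · by_cases h : fb == "y" <;> simp [h, pv_ofList_append_singleton]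
  · rw [PySem.Dict.items_insert_of_not_contains inner fb hfresh]
    simp [List.mem_append, eq_comm]
    by_cases h : "b" ∈ List.map (fun x => x.2) inner.items <;> simp [h, eq_comm, Bool.beq_eq_decide_eq]
  · rw [PySem.Dict.items_insert_of_not_contains inner fb hfresh]; simp
  · by_cases h : (fb == "b" || fb == "y") <;> simp [h, pv_ofList_append_singleton]

theorem pv_phi_empty : phiA PySem.Dict.empty = (PySem.Set.empty, false, 0, PySem.Set.empty) := rfl

-- the scan loop builds exactly the phiA-image of A's occurrences dict
theorem pv_loop1 (fcs : List String) :
    ∀ (xs : List String) (n : Int) (occ : PySem.Dict String (PySem.Dict Int String))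
      (info : PySem.Dict String pvRec),
      info.items = occ.items.map (fun p => (p.1, phiA p.2)) →
      occ.keys.Nodup →
      (∀ p ∈ occ.items, ∀ q ∈ p.2.items, q.1 < n) →
      ((PySem.List.enumerate xs n).foldl (pvB_scan fcs) info).items
        = ((PySem.List.enumerate xs n).foldl (pvA_inner fcs) occ).items.map
            (fun p => (p.1, phiA p.2)) := by
  intro xs
  induction xs with
  | nil => intro n occ info hrel _ _; simpa [PySem.List.enumerate] using hrel
  | cons s xs ih =>
    intro n occ info hrel hnd hbound
    rw [PySem.List.enumerate_cons]
    simp only [List.foldl_cons]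
    -- names for the one-step results
    have hinfo : info = PySem.Dict.mk (occ.items.map (fun p => (p.1, phiA p.2))) :=
      PySem.Dict.ext hrel
    have h1 : info.get? s = (occ.get? s).map phiA := by
      rw [hinfo]; exact pv_get?_map phiA occ.items s
    have hc : info.contains s = occ.contains s := by
      rw [PySem.Dict.contains_eq_isSome_get?, PySem.Dict.contains_eq_isSome_get?, h1]
      cases occ.get? s <;> rfl
    have hfresh : (occ.getD s PySem.Dict.empty).contains n = false := by
      cases hg : occ.get? s with
      | none => simp [PySem.Dict.getD, hg, PySem.Dict.contains_empty]
      | some v =>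
        have hv : (s, v) ∈ occ.items := PySem.Dict.mem_items_of_get?_eq_some _ hg
        simp only [PySem.Dict.getD, hg, Option.getD_some]
        rw [PySem.Dict.contains_eq_isSome_get?]
        cases hw : v.get? n with
        | none => rfl
        | some w =>
          have := hbound _ hv _ (PySem.Dict.mem_items_of_get?_eq_some _ hw)
          omega
    have hgetD : info.getD s (PySem.Set.empty, false, 0, PySem.Set.empty)
        = phiA (occ.getD s PySem.Dict.empty) := by
      cases hg : occ.get? s with
      | none => simp [PySem.Dict.getD, h1, hg, pv_phi_empty]
      | some v => simp [PySem.Dict.getD, h1, hg]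
    have hstep : pvB_scan fcs info (n, s)
        = info.insert s (phiA ((occ.getD s PySem.Dict.empty).insert n (PySem.List.pyGetD fcs n ""))) := by
      unfold pvB_scan PySem.Dict.modify
      rw [hgetD, pv_phi_insert _ _ _ hfresh]
    rw [hstep]
    have hnd1 : (pvA_inner fcs occ (n, s)).keys.Nodup := by
      simp only [pvA_inner]; exact PySem.Dict.nodup_keys_insert _ _ _ hnd
    refine ih (n + 1) _ _ ?_ hnd1 ?_
    · -- items relation survives the insert
      simp only [pvA_inner]
      by_cases hcs : occ.contains s = true
      · rw [PySem.Dict.items_insert_of_contains _ _ (hc.trans hcs),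
            PySem.Dict.items_insert_of_contains _ _ hcs]
        rw [hrel, List.map_map, List.map_map]
        apply List.map_congr_left
        intro p _
        by_cases hp : (p.1 == s) = true <;> simp [hp, Function.comp]
      · have hcs' : occ.contains s = false := by simpa using hcs
        rw [PySem.Dict.items_insert_of_not_contains _ _ (hc.trans hcs'),
            PySem.Dict.items_insert_of_not_contains _ _ hcs']
        rw [hrel, List.map_append]
        rfl
    · -- every inner index stays below n+1
      intro p hp q hq
      simp only [pvA_inner] at hp
      rcases (PySem.Dict.mem_items_insert _ _ _ _).1 hp with hnew | ⟨hold, _⟩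
      · subst hnew
        rcases (PySem.Dict.mem_items_insert _ _ _ _).1 hq with hq1 | ⟨hq2, _⟩
        · subst hq1; omega
        · cases hg : occ.get? s with
          | none =>
            simp [PySem.Dict.getD, hg, PySem.Dict.empty] at hq2
          | some v =>
            have hv : (s, v) ∈ occ.items := PySem.Dict.mem_items_of_get?_eq_some _ hg
            have := hbound _ hv q (by simpa [PySem.Dict.getD, hg] using hq2)
            omega
      · have := hbound _ hold _ hq
        omega

theorem pv_contains_ofList (xs : List String) :
    (PySem.Set.ofList xs).contains "b" = xs.contains "b" := by
  rw [Bool.eq_iff_iff]; simp [PySem.Set.mem_ofList]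

-- B's emit on the phiA-image does what A's group step does
theorem pv_emit_group (st : pvSt) (q : String × PySem.Dict Int String) :
    pvB_emit st (q.1, phiA q.2) = pvA_group st q := by
  unfold pvB_emit pvA_group phiA
  simp only [pv_contains_ofList]

theorem pv_loop2 : ∀ (l : List (String × PySem.Dict Int String)) (st : pvSt),
    (l.map (fun p => (p.1, phiA p.2))).foldl pvB_emit st = l.foldl pvA_group st := by
  intro l
  induction l with
  | nil => intro st; rfl
  | cons p t ih => intro st; simp only [List.map_cons, List.foldl_cons, pv_emit_group]; exact ih _

theorem pv_word_eq : pvB_word = pvA_word := by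
  funext st g
  simp only [pvB_word, pvA_word]
  rw [pv_loop1 (g.2.toList.map pvStrB) (g.1.toList.map pvStrB) 0 PySem.Dict.empty PySem.Dict.empty
        rfl (by simp [PySem.Dict.keys, PySem.Dict.empty])
        (by intro p hp; simp [PySem.Dict.empty] at hp),
      pv_loop2]
  rfl

-- ===== VERDICT (by name: the statement is the Claim_ definition above) =====
theorem get_restrictions_from_guesses_spec : Claim_equal_get_restrictions_from_guesses := by
  intro guesses _ _
  unfold Spec_get_restrictions_from_guesses
  unfold get_restrictions_from_guesses get_restrictions_from_guesses_alt
  rw [pv_word_eq]
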